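-- pv_equiv track=rewrite | github.com/kajigor/fl-2021-hse-win | solution/parser/main.py | get_var_value
-- ===== SOURCE A (Python) =====
-- def index_checking(s, index, arr):
--     if len(s) <= index:
--         return False
--     for i in arr:
--         if s[index] == i:
--             return False
--     return True
--
-- def char_checking(ch):
--     if ch == '>':
--         return "&gt;"
--     if ch == '<':
--         return "&lt;"
--     if ch == '&':
--         return "&amp;"
--     if ch != ' ':
--         return ch
--     return ''
--
-- def get_var_value(s):
--     index = 0
--     result = ""
--     while index_checking(s, index, {'='}):
--         index += 1
--     index += 1
--     while index < len(s) and s[index] == ' ':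
--         index += 1
--     while index_checking(s, index, {';', ']'}):
--         result += char_checking(s[index])
--         index += 1
--     return result
-- ===== SOURCE B (Python) =====
-- _TR = str.maketrans({'>': '&gt;', '<': '&lt;', '&': '&amp;', ' ': ''})
--
-- def get_var_value(s):
--     eq = s.find('=')
--     if eq == -1:
--         return ''
--     seg = s[eq + 1:]
--     end = min((p for p in (seg.find(';'), seg.find(']')) if p != -1),
--               default=len(seg))
--     return seg[:end].translate(_TR)
-- ===== Notes on version B (the rewrite author's own statement) =====
-- stated objective: idiomatic
-- what changed: Replaces A's three index-walking while-loops with per-character string concatenation by a find-the-boundaries decomposition: locate the assignment separator with str.find, clip the tail at the earliest terminator position, and escape/drop characters in one batch str.translate pass.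
import Mathlib
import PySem

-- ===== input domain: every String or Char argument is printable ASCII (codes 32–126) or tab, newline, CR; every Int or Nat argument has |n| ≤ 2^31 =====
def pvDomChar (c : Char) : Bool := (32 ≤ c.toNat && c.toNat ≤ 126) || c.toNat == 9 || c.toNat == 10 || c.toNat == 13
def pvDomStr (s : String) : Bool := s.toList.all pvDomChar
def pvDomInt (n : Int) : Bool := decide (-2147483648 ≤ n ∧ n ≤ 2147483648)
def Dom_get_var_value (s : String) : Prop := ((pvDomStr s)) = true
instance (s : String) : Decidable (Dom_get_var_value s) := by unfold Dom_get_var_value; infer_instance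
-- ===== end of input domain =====

-- B replaces A's index-walking while-loops with find-the-boundaries-then-batch-translate (idiomatic).

-- ===== PORT A =====
def pyIndexChecking (s : List Char) (index : Nat) (arr : List Char) : Bool :=
  if s.length ≤ index then false
  else arr.all (fun i => !(s.getD index ' ' == i))

theorem pyIndexChecking_lt {s : List Char} {i : Nat} {arr : List Char}
    (h : pyIndexChecking s i arr = true) : i < s.length := by
  unfold pyIndexChecking at h
  split at h
  · exact absurd h (by simp)
  · omega

def pyCharChecking (ch : Char) : List Char :=
  if ch = '>' then "&gt;".toList
  else if ch = '<' then "&lt;".toList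
  else if ch = '&' then "&amp;".toList
  else if ch ≠ ' ' then [ch]
  else []

def loopA1 (s : List Char) (index : Nat) : Nat :=
  if h : pyIndexChecking s index ['='] = true then loopA1 s (index + 1) else index
termination_by s.length - index
decreasing_by have := pyIndexChecking_lt h; omega

def loopA2 (s : List Char) (index : Nat) : Nat :=
  if h : index < s.length ∧ s.getD index ' ' = ' ' then loopA2 s (index + 1) else index
termination_by s.length - index
decreasing_by omega

def loopA3 (s : List Char) (index : Nat) (result : List Char) : List Char :=
  if h : pyIndexChecking s index [';', ']'] = true then
    loopA3 s (index + 1) (result ++ pyCharChecking (s.getD index ' '))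
  else result
termination_by s.length - index
decreasing_by have := pyIndexChecking_lt h; omega

def get_var_value (s : String) : String :=
  let l := s.toList
  let i1 := loopA1 l 0
  let i2 := i1 + 1
  let i3 := loopA2 l i2
  String.mk (loopA3 l i3 [])

-- ===== PORT B =====
def trB (c : Char) : List Char :=
  if c = '>' then "&gt;".toList
  else if c = '<' then "&lt;".toList
  else if c = '&' then "&amp;".toList
  else if c = ' ' then []
  else [c]

def get_var_value_alt (s : String) : String :=
  let eq := PySem.Str.find s "="
  if eq = -1 then ""
  else
    let seg := PySem.List.slice s.toList (some (eq + 1)) none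
    let p1 := PySem.Chars.find seg [';']
    let p2 := PySem.Chars.find seg [']']
    let e1 := if p1 = -1 then (seg.length : Int) else p1
    let e2 := if p2 = -1 then (seg.length : Int) else p2
    String.mk ((PySem.List.slice seg none (some (min e1 e2))).flatMap trB)

-- ===== PRECONDITION & SPEC =====
def Spec_get_var_value (s : String) (out : String) : Prop := out = get_var_value_alt s
instance (s : String) (out : String) : Decidable (Spec_get_var_value s out) := by unfold Spec_get_var_value; infer_instance

-- ===== CLAIM (what is proved, stated in full; the proofs are below) =====
def Claim_equal_get_var_value : Prop := ∀ (s : String), Dom_get_var_value s → Spec_get_var_value s (get_var_value s)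

-- ===== LEMMAS AND PROOFS =====

-- first index (as a Nat, length if absent) where p holds
def firstP (p : Char → Bool) : List Char → Nat
  | [] => 0
  | a :: t => if p a then 0 else firstP p t + 1

theorem firstP_cons (p : Char → Bool) (a : Char) (t : List Char) :
    firstP p (a :: t) = if p a then 0 else firstP p t + 1 := rfl

theorem firstP_of_not_mem {c : Char} {l : List Char} (h : c ∉ l) :
    firstP (· = c) l = l.length := by
  induction l with
  | nil => rfl
  | cons a t ih =>
    simp only [List.mem_cons, not_or] at h
    simp [firstP, Ne.symm h.1, ih h.2]

theorem singleton_prefix_cons {c a : Char} {t : List Char} :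
    [c] <+: a :: t ↔ a = c := by
  constructor
  · rintro ⟨r, hr⟩
    simp only [List.singleton_append, List.cons.injEq] at hr
    exact hr.1.symm
  · rintro rfl; exact ⟨t, rfl⟩

theorem firstP_eq_of_prefix {c : Char} {l : List Char} {k : Nat}
    (h1 : [c] <+: l.drop k) (h2 : ∀ i < k, ¬ [c] <+: l.drop i) :
    firstP (· = c) l = k := by
  induction l generalizing k with
  | nil => rw [List.drop_nil] at h1; exact absurd (List.prefix_nil.mp h1) (by simp)
  | cons a t ih =>
    cases k with
    | zero =>
      rw [List.drop_zero] at h1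
      simp [firstP, singleton_prefix_cons.mp h1]
    | succ k =>
      have ha : ¬ [c] <+: a :: t := by simpa using h2 0 (by omega)
      have ha' : a ≠ c := fun h => ha (singleton_prefix_cons.mpr h)
      have := ih (k := k) (by simpa using h1)
        (fun i hi => by simpa using h2 (i + 1) (by omega))
      simp [firstP, ha', this]

theorem find_bridge (l : List Char) (c : Char) :
    (if PySem.Chars.find l [c] = -1 then (l.length : Int) else PySem.Chars.find l [c])
      = (firstP (· = c) l : Int) := by
  by_cases h : PySem.Chars.find l [c] = -1
  · rw [if_pos h]
    have hnin : c ∉ l := by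
      intro hm
      obtain ⟨u, v, hu⟩ := List.append_of_mem hm
      exact (PySem.Chars.find_eq_neg_one_iff l [c]).mp h ⟨u, v, by rw [hu]; simp⟩
    rw [firstP_of_not_mem hnin]
  · rw [if_neg h]
    have h0 : 0 ≤ PySem.Chars.find l [c] := by
      have := PySem.Chars.neg_one_le_find l [c]; omega
    obtain ⟨hpre, hmin⟩ := PySem.Chars.find_spec (s := l) (sub := [c]) h0
    rw [firstP_eq_of_prefix hpre hmin]
    omega

def pTerm (c : Char) : Bool := c == ';' || c == ']'

theorem firstP_or (l : List Char) :
    firstP pTerm l = min (firstP (· = ';') l) (firstP (· = ']') l) := by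
  induction l with
  | nil => rfl
  | cons a t ih =>
    by_cases h1 : a = ';'
    · simp [firstP, pTerm, h1]
    · by_cases h2 : a = ']'
      · simp [firstP, pTerm, h1, h2]
      · simp [firstP, pTerm, h1, h2, ih]

theorem takeWhile_eq_take_firstP (l : List Char) :
    l.takeWhile (fun c => !(pTerm c)) = l.take (firstP pTerm l) := by
  induction l with
  | nil => rfl
  | cons a t ih =>
    by_cases h : pTerm a
    · simp [List.takeWhile_cons, firstP, h]
    · simp [List.takeWhile_cons, firstP, h, ih]

theorem escEq : pyCharChecking = trB := by
  funext c
  unfold pyCharChecking trB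
  split_ifs <;> simp_all

theorem drop_cons_getD {l : List Char} {i : Nat} (h : i < l.length) :
    l.drop i = l.getD i ' ' :: l.drop (i + 1) := by
  rw [List.getD_eq_getElem l ' ' h]
  exact List.drop_eq_getElem_cons h

theorem pyIC_true {s : List Char} {i : Nat} {arr : List Char} :
    pyIndexChecking s i arr = true ↔ i < s.length ∧ ∀ c ∈ arr, s.getD i ' ' ≠ c := by
  unfold pyIndexChecking
  split <;> simp <;> omega

theorem loopA1_eq (s : List Char) (i : Nat) :
    loopA1 s i = i + firstP (· = '=') (s.drop i) := by
  fun_induction loopA1 s i with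
  | case1 i h ih =>
    obtain ⟨hlt, hne⟩ := pyIC_true.mp h
    have hne' : s.getD i ' ' ≠ '=' := hne '=' (by simp)
    rw [ih, drop_cons_getD hlt, firstP_cons, if_neg (by simpa using hne')]
    omega
  | case2 i h =>
    by_cases hlt : i < s.length
    · have heq : s.getD i ' ' = '=' := by
        by_contra hc
        exact h (pyIC_true.mpr ⟨hlt, by simpa using hc⟩)
      rw [drop_cons_getD hlt, firstP_cons, if_pos (by rw [heq]; decide)]
      omega
    · rw [List.drop_eq_nil_of_le (by omega)]
      simp [firstP]

theorem loopA3_eq (s : List Char) (i : Nat) (r : List Char) :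
    loopA3 s i r = r ++ ((s.drop i).takeWhile (fun c => !(pTerm c))).flatMap pyCharChecking := by
  fun_induction loopA3 s i r with
  | case1 i r h ih =>
    obtain ⟨hlt, hne⟩ := pyIC_true.mp h
    have h1 : s.getD i ' ' ≠ ';' := hne ';' (by simp)
    have h2 : s.getD i ' ' ≠ ']' := hne ']' (by simp)
    have hq : (!(pTerm (s.getD i ' '))) = true := by
      simp [pTerm]
      exact ⟨by simpa using h1, by simpa using h2⟩
    rw [ih, drop_cons_getD hlt, List.takeWhile_cons, if_pos hq, List.flatMap_cons,
        List.append_assoc]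
  | case2 i r h =>
    by_cases hlt : i < s.length
    · have hq : pTerm (s.getD i ' ') = true := by
        by_contra hc
        simp only [pTerm, Bool.or_eq_true, beq_iff_eq, not_or] at hc
        apply h
        apply pyIC_true.mpr
        refine ⟨hlt, fun c hc' => ?_⟩
        simp only [List.mem_cons, List.not_mem_nil, or_false] at hc'
        rcases hc' with rfl | rfl
        · exact fun he => hc.1 he
        · exact fun he => hc.2 he
      rw [drop_cons_getD hlt, List.takeWhile_cons, if_neg (by simpa using hq),
          List.flatMap_nil, List.append_nil]
    · rw [List.drop_eq_nil_of_le (by omega)]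
      simp

theorem loopA2_absorb (s : List Char) (i : Nat) :
    ((s.drop (loopA2 s i)).takeWhile (fun c => !(pTerm c))).flatMap pyCharChecking
      = ((s.drop i).takeWhile (fun c => !(pTerm c))).flatMap pyCharChecking := by
  fun_induction loopA2 s i with
  | case1 i h ih =>
    obtain ⟨hlt, hsp⟩ := h
    rw [ih, drop_cons_getD hlt, hsp, List.takeWhile_cons]
    simp [pTerm, pyCharChecking]
  | case2 i h => rfl

-- ===== VERDICT (by name: the statement is the Claim_ definition above) =====
theorem get_var_value_spec : Claim_equal_get_var_value := by
  intro s _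
  unfold Spec_get_var_value get_var_value get_var_value_alt
  simp only [PySem.Str.find_eq, show "=".toList = ['='] from rfl]
  set l := s.toList with hl
  have hfind : (if PySem.Chars.find l ['='] = -1 then (l.length : Int) else PySem.Chars.find l ['=']) = (firstP (· = '=') l : Int) := find_bridge l '='
  by_cases h : PySem.Chars.find l ['='] = -1
  · -- no '=': A's first loop runs to the end, result is empty
    have hk : firstP (· = '=') l = l.length := by
      rw [if_pos h] at hfind; exact_mod_cast hfind.symm
    rw [if_pos (by simpa using h)]
    rw [loopA3_eq, loopA2_absorb, loopA1_eq, List.drop_zero, Nat.zero_add, hk,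
        List.drop_eq_nil_of_le (by omega)]
    simp
    rfl
  · rw [if_neg (by simpa using h)]
    have h0 : 0 ≤ PySem.Chars.find l ['='] := by
      have := PySem.Chars.neg_one_le_find l ['=']; omega
    have hk : (PySem.Chars.find l ['=']).toNat = firstP (· = '=') l := by
      rw [if_neg h] at hfind; omega
    have hseg : PySem.List.slice l (some (PySem.Chars.find l ['='] + 1)) none
        = l.drop (firstP (· = '=') l + 1) := by
      rw [PySem.List.slice_from _ (by omega)]
      congr 1
      omega
    rw [hseg]
    set seg := l.drop (firstP (· = '=') l + 1) with hsegdef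
    have he1 := find_bridge seg ';'
    have he2 := find_bridge seg ']'
    rw [he1, he2]
    have hmin : min ((firstP (· = ';') seg : Int)) ((firstP (· = ']') seg : Int))
        = ((firstP pTerm seg : Nat) : Int) := by
      rw [firstP_or]; push_cast; omega
    rw [hmin, PySem.List.slice_to _ (by omega)]
    rw [Int.toNat_natCast]
    rw [loopA3_eq, loopA2_absorb, loopA1_eq, List.drop_zero, Nat.zero_add, ← hsegdef]
    rw [← takeWhile_eq_take_firstP, escEq]
    simp
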